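-- pv_equiv track=rewrite | github.com/jano31415/codejam | codejam/y2022/round2/proba.py | get_sol_pos2
-- ===== SOURCE A (Python) =====
-- def get_sol_pos2(n,k):
--     xmax=n
--     ymax=n
--     dist=0
--     mid = n//2 + 1
--     curx=1
--     cury=1
--     while True:
--         circle = 4*(xmax-1)
--         if dist + circle + abs(curx - mid) + abs(cury - mid) > k:
--             break
--         curx += 1
--         cury += 1
--         dist += circle
--         xmax -= 2
--         ymax -= 2
--     for i in range(xmax-1):
--         if dist + abs(curx - mid) + abs(cury - mid) == k:
--             return (curx, cury), None
--         curx+=1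
--         dist+=1
--     for i in range(ymax-1):
--         if dist + abs(curx - mid) + abs(cury - mid) == k:
--             return (curx,cury), None
--         cury+=1
--         dist+=1
--     for i in range(xmax-1):
--         if dist + abs(curx - mid) + abs(cury - mid) == k:
--             return (curx,cury), None
--         curx-=1
--         dist+=1
--     for i in range(ymax-2):
--         if dist + abs(curx - mid) + abs(cury - mid) == k:
--             return (curx,cury), None
--         cury-=1
--         dist+=1
--     return (curx, cury), None
-- ===== SOURCE B (Python) =====
-- def first_j(a, L, target):
--     # least j in [0, L-1] with j + abs(a + j) == target, else None
--     if L >= 1 and abs(a) == target: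
--         return 0
--     if (target - a) % 2 == 0:
--         j = (target - a) // 2
--         if 1 <= j <= L - 1 and j + abs(a + j) == target:
--             return j
--     return None
--
--
-- def get_sol_pos2(n, k):
--     mid = n // 2 + 1
--
--     def f(t):
--         # dist walked after t full rings, plus next ring's length, plus
--         # Manhattan offset of the ring's corner: A's while-loop break value.
--         return 4 * t * (n - t) + 4 * (n - 2 * t - 1) + 2 * abs(t + 1 - mid)
--
--     if f(0) > k:
--         t = 0
--     else:
--         # f is non-decreasing up to tmax; binary search the first break ring
--         lo, hi = 0, max(0, (2 * n - 3) // 4)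
--         while hi - lo > 1:
--             m = (lo + hi) // 2
--             if f(m) > k:
--                 hi = m
--             else:
--                 lo = m
--         t = hi
--     s = t + 1
--     m = n - 2 * t
--     e = max(m - 1, 0)
--     d0 = 4 * t * (n - t)
--     j = first_j(s - mid, m - 1, k - d0 - abs(s - mid))
--     if j is not None:
--         return (s + j, s), None
--     x1 = s + e
--     d1 = d0 + e
--     j = first_j(s - mid, m - 1, k - d1 - abs(x1 - mid))
--     if j is not None:
--         return (x1, s + j), None
--     y1 = s + e
--     d2 = d1 + e
--     j = first_j(mid - x1, m - 1, k - d2 - abs(y1 - mid))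
--     if j is not None:
--         return (x1 - j, y1), None
--     d3 = d2 + e
--     j = first_j(mid - y1, m - 2, k - d3 - abs(x1 - e - mid))
--     if j is not None:
--         return (x1 - e, y1 - j), None
--     return (x1 - e, y1 - max(m - 2, 0)), None
-- ===== Notes on version B (the rewrite author's own statement) =====
-- stated objective: faster
-- what changed: A walks the spiral cell by cell (O(n) loop iterations); B locates the break ring by binary search on the closed-form ring cost function and solves each of the four sides' linear |.|-equations in O(1) instead of scanning them.
import Mathlib
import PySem

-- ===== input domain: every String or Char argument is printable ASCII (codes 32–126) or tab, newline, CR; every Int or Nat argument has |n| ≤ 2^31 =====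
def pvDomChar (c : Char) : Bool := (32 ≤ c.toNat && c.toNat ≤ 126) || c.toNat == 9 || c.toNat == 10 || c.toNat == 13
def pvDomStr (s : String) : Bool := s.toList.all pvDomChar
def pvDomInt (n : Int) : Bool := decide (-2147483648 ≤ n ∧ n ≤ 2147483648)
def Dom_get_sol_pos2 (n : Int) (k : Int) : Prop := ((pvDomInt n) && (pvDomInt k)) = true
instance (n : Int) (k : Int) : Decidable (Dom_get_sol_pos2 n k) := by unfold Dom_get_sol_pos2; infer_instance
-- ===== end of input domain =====

-- B replaces A's cell-by-cell spiral walk by a binary search for the break ring on the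
-- closed-form ring cost fB plus one O(1) linear |.|-equation solve per side (objective: faster).
-- A's 'while True' never breaks for k at or above the maximal break value; those inputs are
-- outside Pre_ below (A diverges there), and A's port carries fuel provably sufficient on Pre_.

-- ===== PORT A =====
def aLoop (k mid : Int) : Nat → Int → Int → Int → Int → Int → Int × Int × Int × Int × Int
  | 0, xmax, ymax, dist, curx, cury => (xmax, ymax, dist, curx, cury)
  | fuel+1, xmax, ymax, dist, curx, cury =>
      let circle := 4*(xmax-1)
      if dist + circle + |curx - mid| + |cury - mid| > k then (xmax, ymax, dist, curx, cury)
      else aLoop k mid fuel (xmax-2) (ymax-2) (dist+circle) (curx+1) (cury+1)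

def aLeg (k mid dx dy : Int) : Nat → Int → Int → Int → Option (Int × Int) × (Int × Int × Int)
  | 0, dist, x, y => (none, (dist, x, y))
  | l+1, dist, x, y =>
      if dist + |x - mid| + |y - mid| = k then (some (x, y), (dist, x, y))
      else aLeg k mid dx dy l (dist+1) (x+dx) (y+dy)

def get_sol_pos2 (n : Int) (k : Int) : (Int × Int) × Option Int :=
  let mid := PySem.Int.floordiv n 2 + 1
  match aLoop k mid (n.toNat + 1) n n 0 1 1 with
  | (xmax, ymax, dist, curx, cury) =>
    match aLeg k mid 1 0 (xmax-1).toNat dist curx cury with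
    | (some p, _) => (p, none)
    | (none, (d1, x1, y1)) =>
      match aLeg k mid 0 1 (ymax-1).toNat d1 x1 y1 with
      | (some p, _) => (p, none)
      | (none, (d2, x2, y2)) =>
        match aLeg k mid (-1) 0 (xmax-1).toNat d2 x2 y2 with
        | (some p, _) => (p, none)
        | (none, (d3, x3, y3)) =>
          match aLeg k mid 0 (-1) (ymax-2).toNat d3 x3 y3 with
          | (some p, _) => (p, none)
          | (none, (_, x4, y4)) => ((x4, y4), none)

-- ===== PORT B =====
def fB (n t : Int) : Int :=
  4*t*(n-t) + 4*(n-2*t-1) + 2*|t+1 - (PySem.Int.floordiv n 2 + 1)|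

def firstJ (a L target : Int) : Option Int :=
  if 1 ≤ L ∧ |a| = target then some 0
  else if PySem.Int.mod (target - a) 2 = 0 then
    let j := PySem.Int.floordiv (target - a) 2
    if 1 ≤ j ∧ j ≤ L - 1 ∧ j + |a + j| = target then some j else none
  else none

def bLoop (n k : Int) : Nat → Int → Int → Int
  | 0, _, hi => hi
  | fl+1, lo, hi =>
    if hi - lo > 1 then
      let m := PySem.Int.floordiv (lo + hi) 2
      if fB n m > k then bLoop n k fl lo m else bLoop n k fl m hi
    else hi

def get_sol_pos2_alt (n : Int) (k : Int) : (Int × Int) × Option Int :=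
  let mid := PySem.Int.floordiv n 2 + 1
  let t := if fB n 0 > k then 0 else
    let hi := max 0 (PySem.Int.floordiv (2*n - 3) 4)
    bLoop n k hi.toNat 0 hi
  let s := t + 1
  let m := n - 2*t
  let e := max (m - 1) 0
  let d0 := 4*t*(n-t)
  match firstJ (s - mid) (m-1) (k - d0 - |s - mid|) with
  | some j => ((s + j, s), none)
  | none =>
    let x1 := s + e
    let d1 := d0 + e
    match firstJ (s - mid) (m-1) (k - d1 - |x1 - mid|) with
    | some j => ((x1, s + j), none)
    | none =>
      let y1 := s + e
      let d2 := d1 + e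
      match firstJ (mid - x1) (m-1) (k - d2 - |y1 - mid|) with
      | some j => ((x1 - j, y1), none)
      | none =>
        let d3 := d2 + e
        match firstJ (mid - y1) (m-2) (k - d3 - |x1 - e - mid|) with
        | some j => ((x1 - e, y1 - j), none)
        | none => ((x1 - e, y1 - max (m - 2) 0), none)

-- Pre_ excludes exactly the inputs on which A's 'while True' never breaks, i.e. A loops forever:
-- the break value fB n t is maximal at t = max 0 ((2n-3)//4), so A breaks at some ring iff k < that maximum.
def Pre_get_sol_pos2 (n : Int) (k : Int) : Prop :=
  k < fB n (max 0 (PySem.Int.floordiv (2*n - 3) 4))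
instance (n : Int) (k : Int) : Decidable (Pre_get_sol_pos2 n k) := by unfold Pre_get_sol_pos2; infer_instance
def pvWitness_get_sol_pos2 : Int × Int := (5, 8)

def Spec_get_sol_pos2 (n : Int) (k : Int) (out : (Int × Int) × Option Int) : Prop := out = get_sol_pos2_alt n k
instance (n : Int) (k : Int) (out : (Int × Int) × Option Int) : Decidable (Spec_get_sol_pos2 n k out) := by unfold Spec_get_sol_pos2; infer_instance

-- ===== CLAIM (what is proved, stated in full; the proofs are below) =====
def Claim_equal_get_sol_pos2 : Prop := ∀ (n : Int) (k : Int), Dom_get_sol_pos2 n k → Pre_get_sol_pos2 n k → Spec_get_sol_pos2 n k (get_sol_pos2 n k)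

-- ===== LEMMAS AND PROOFS =====

-- thin aliases of the PySem bracket lemmas, in the argument form used below
theorem pvFloordivPos (a b : Int) (h : 0 < b) : PySem.Int.floordiv a b = a / b :=
  PySem.Int.floordiv_eq_ediv_of_pos h
theorem pvModPos (a b : Int) (h : 0 < b) : PySem.Int.mod a b = a % b :=
  PySem.Int.mod_eq_emod_of_pos h


theorem fB_step (n t : Int) (h0 : 0 ≤ t) (h1 : t + 1 ≤ max 0 (PySem.Int.floordiv (2*n - 3) 4)) :
    fB n t ≤ fB n (t+1) := by
  rw [pvFloordivPos _ _ (by norm_num)] at h1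
  have hle : t + 1 ≤ (2*n-3)/4 := le_trans h1 (by omega)
  have h8 : 8*t ≤ 4*n - 14 := by omega
  unfold fB
  rw [pvFloordivPos _ _ (by norm_num)]
  have hs1 : t + 1 - (n/2 + 1) ≤ 0 := by omega
  have hs2 : t + 1 + 1 - (n/2 + 1) ≤ 0 := by omega
  rw [abs_of_nonpos hs1, abs_of_nonpos hs2]
  linarith

theorem fB_mono (n : Int) : ∀ d : Nat, ∀ a : Int, 0 ≤ a →
    a + d ≤ max 0 (PySem.Int.floordiv (2*n - 3) 4) → fB n a ≤ fB n (a + d) := by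
  intro d
  induction d with
  | zero => intro a _ _; simp
  | succ d ih =>
    intro a h0 hb
    have hcast : ((d+1 : Nat) : Int) = (d : Int) + 1 := by push_cast; ring
    rw [hcast] at hb ⊢
    have h1 : a + d ≤ max 0 (PySem.Int.floordiv (2*n-3) 4) := by omega
    calc fB n a ≤ fB n (a + d) := ih a h0 h1
    _ ≤ fB n (a + d + 1) := fB_step n (a + d) (by omega) (by omega)
    _ = fB n (a + ((d : Int) + 1)) := by ring_nf

theorem aLoop_ring (n k mid : Int) (hmid : mid = PySem.Int.floordiv n 2 + 1) (T : Nat)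
    (hPT : fB n T > k) (hmin : ∀ i : Nat, i < T → ¬ fB n i > k) :
    ∀ fuel t : Nat, t ≤ T → T < t + fuel →
    aLoop k mid fuel (n - 2*t) (n - 2*t) (4*t*(n-t)) (1+t) (1+t)
      = (n - 2*(T:Int), n - 2*(T:Int), 4*(T:Int)*(n-T), 1+(T:Int), 1+(T:Int)) := by
  intro fuel
  induction fuel with
  | zero => intro t h1 h2; omega
  | succ fuel ih =>
    intro t h1 h2
    have hcond : (4*(t:Int)*(n-t) + 4*((n-2*t)-1) + |1+(t:Int) - mid| + |1+(t:Int) - mid| > k)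
        ↔ fB n t > k := by
      unfold fB
      rw [hmid]
      constructor <;> intro h <;>
        · have habs : |(t:Int)+1 - (PySem.Int.floordiv n 2 + 1)| = |1+(t:Int) - (PySem.Int.floordiv n 2 + 1)| := by ring_nf
          simp only [habs] at *
          linarith
    by_cases hb : fB n t > k
    · have ht : t = T := by
        rcases Nat.lt_or_ge t T with h | h
        · exact absurd hb (hmin t h)
        · omega
      subst ht
      simp only [aLoop]
      rw [if_pos (by rw [hcond]; exact hb)]
    · have htT : t < T := by
        rcases Nat.lt_or_ge t T with h | h
        · exact h
        · have heqt : t = T := by omega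
          rw [heqt] at hb; exact absurd hPT hb
      simp only [aLoop]
      rw [if_neg (by rw [hcond]; exact hb)]
      have e1 : (n - 2*(t:Int)) - 2 = n - 2*((t+1 : Nat) : Int) := by push_cast; ring
      have e2 : 4*(t:Int)*(n-t) + 4*((n - 2*(t:Int)) - 1) = 4*((t+1:Nat):Int)*(n-((t+1:Nat):Int)) := by
        push_cast; ring
      have e3 : 1+(t:Int)+1 = 1+((t+1:Nat):Int) := by push_cast; ring
      rw [e1, e2, e3]
      exact ih (t+1) htT (by omega)

theorem bLoop_spec (n k : Int) : ∀ fl : Nat, ∀ lo hi : Int, lo < hi →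
    fB n lo ≤ k → fB n hi > k → hi - lo ≤ fl →
    lo < bLoop n k fl lo hi ∧ bLoop n k fl lo hi ≤ hi ∧
      fB n (bLoop n k fl lo hi) > k ∧ fB n (bLoop n k fl lo hi - 1) ≤ k := by
  intro fl
  induction fl with
  | zero => intro lo hi h1 _ _ h4; omega
  | succ fl ih =>
    intro lo hi h1 h2 h3 h4
    simp only [bLoop]
    by_cases hgap : hi - lo > 1
    · rw [if_pos hgap]
      have hm : PySem.Int.floordiv (lo + hi) 2 = (lo + hi)/2 := pvFloordivPos _ _ (by norm_num)
      have hlm : lo < (lo+hi)/2 := by omega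
      have hmh : (lo+hi)/2 < hi := by omega
      by_cases hf : fB n (PySem.Int.floordiv (lo + hi) 2) > k
      · rw [if_pos hf]
        rw [hm] at hf ⊢
        have := ih lo ((lo+hi)/2) hlm h2 hf (by omega)
        exact ⟨this.1, by omega, this.2.2⟩
      · rw [if_neg hf]
        rw [hm] at hf ⊢
        have := ih ((lo+hi)/2) hi hmh (by omega) h3 (by omega)
        exact ⟨by omega, this.2.1, this.2.2⟩
    · rw [if_neg hgap]
      have : hi - 1 = lo := by omega
      exact ⟨h1, le_refl _, h3, by rw [this]; exact h2⟩

theorem firstJ_none (a L target : Int) (h : firstJ a L target = none) :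
    ∀ j : Int, 0 ≤ j → j ≤ L - 1 → j + |a + j| ≠ target := by
  intro j hj0 hjL heq
  simp only [firstJ] at h
  split_ifs at h with h1 h2 h3
  · have hL : 1 ≤ L := by omega
    rw [pvModPos _ _ (by norm_num)] at h2
    by_cases hsign : 0 ≤ a + j
    · rw [abs_of_nonneg hsign] at heq
      have hjval : PySem.Int.floordiv (target - a) 2 = j := by
        rw [pvFloordivPos _ _ (by norm_num)]; omega
      rw [hjval] at h3
      by_cases hj1 : 1 ≤ j
      · exact h3 ⟨hj1, hjL, by rw [abs_of_nonneg hsign]; omega⟩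
      · have hj0' : j = 0 := by omega
        subst hj0'
        exact h1 ⟨hL, by rw [abs_of_nonneg (by omega)]; omega⟩
    · push_neg at hsign
      rw [abs_of_nonpos (by omega)] at heq
      exact h1 ⟨hL, by rw [abs_of_nonpos (by omega)]; omega⟩
  · have hL : 1 ≤ L := by omega
    rw [pvModPos _ _ (by norm_num)] at h2
    by_cases hsign : 0 ≤ a + j
    · rw [abs_of_nonneg hsign] at heq
      omega
    · push_neg at hsign
      rw [abs_of_nonpos (by omega)] at heq
      exact h1 ⟨hL, by rw [abs_of_nonpos (by omega)]; omega⟩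

theorem firstJ_some (a L target j : Int) (h : firstJ a L target = some j) :
    0 ≤ j ∧ j ≤ L - 1 ∧ j + |a + j| = target ∧
      ∀ i : Int, 0 ≤ i → i < j → i + |a + i| ≠ target := by
  simp only [firstJ] at h
  split_ifs at h with h1 h2 h3
  · have hj : (0 : Int) = j := Option.some.inj h
    subst hj
    refine ⟨le_refl _, by omega, by simpa using h1.2, ?_⟩
    intro i h1' h2'; omega
  · have hj : PySem.Int.floordiv (target - a) 2 = j := Option.some.inj h
    subst hj
    refine ⟨by omega, h3.2.1, h3.2.2, ?_⟩
    intro i hi0 hij heq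
    rw [pvModPos _ _ (by norm_num)] at h2
    rw [pvFloordivPos _ _ (by norm_num)] at h3 hij
    by_cases hsign : 0 ≤ a + i
    · rw [abs_of_nonneg hsign] at heq
      omega
    · push_neg at hsign
      rw [abs_of_nonpos (by omega)] at heq
      have hL : 1 ≤ L := by omega
      exact h1 ⟨hL, by rw [abs_of_nonpos (by omega)]; omega⟩

theorem aLeg_none (k mid dx dy : Int) : ∀ L : Nat, ∀ d x y : Int,
    (∀ j : Nat, j < L → d + j + |x + j*dx - mid| + |y + j*dy - mid| ≠ k) →
    aLeg k mid dx dy L d x y = (none, (d + L, x + L*dx, y + L*dy)) := by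
  intro L
  induction L with
  | zero => intro d x y _; simp [aLeg]
  | succ L ih =>
    intro d x y hno
    simp only [aLeg]
    rw [if_neg (by
      have := hno 0 (by omega)
      simpa using this)]
    have hrec := ih (d+1) (x+dx) (y+dy) (by
      intro j hj
      have := hno (j+1) (by omega)
      push_cast at this ⊢
      have e1 : x + dx + (j:Int)*dx = x + ((j:Int)+1)*dx := by ring
      have e2 : y + dy + (j:Int)*dy = y + ((j:Int)+1)*dy := by ring
      rw [e1, e2]
      intro hc; apply this; linarith)
    rw [hrec]
    have e1 : d + 1 + (L:Int) = d + ((L:Nat)+1 : Nat) := by push_cast; ring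
    have e2 : x + dx + (L:Int)*dx = x + (((L:Nat)+1 : Nat):Int)*dx := by push_cast; ring
    have e3 : y + dy + (L:Int)*dy = y + (((L:Nat)+1 : Nat):Int)*dy := by push_cast; ring
    rw [e1, e2, e3]

theorem aLeg_some (k mid dx dy : Int) : ∀ L : Nat, ∀ d x y : Int, ∀ j : Nat, j < L →
    (∀ i : Nat, i < j → d + i + |x + i*dx - mid| + |y + i*dy - mid| ≠ k) →
    d + j + |x + j*dx - mid| + |y + j*dy - mid| = k →
    (aLeg k mid dx dy L d x y).1 = some (x + j*dx, y + j*dy) := by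
  intro L
  induction L with
  | zero => intro d x y j hj; omega
  | succ L ih =>
    intro d x y j hj hmin heq
    simp only [aLeg]
    cases j with
    | zero =>
      rw [if_pos (by simpa using heq)]
      simp
    | succ j =>
      rw [if_neg (by
        have := hmin 0 (by omega)
        simpa using this)]
      have hrec := ih (d+1) (x+dx) (y+dy) j (by omega)
        (by
          intro i hi
          have := hmin (i+1) (by omega)
          push_cast at this ⊢
          have e1 : x + dx + (i:Int)*dx = x + ((i:Int)+1)*dx := by ring
          have e2 : y + dy + (i:Int)*dy = y + ((i:Int)+1)*dy := by ring
          rw [e1, e2]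
          intro hc; apply this; linarith)
        (by
          push_cast at heq ⊢
          have e1 : x + dx + (j:Int)*dx = x + ((j:Int)+1)*dx := by ring
          have e2 : y + dy + (j:Int)*dy = y + ((j:Int)+1)*dy := by ring
          rw [e1, e2]; linarith)
      rw [hrec]
      push_cast
      have e1 : x + dx + (j:Int)*dx = x + ((j:Int)+1)*dx := by ring
      have e2 : y + dy + (j:Int)*dy = y + ((j:Int)+1)*dy := by ring
      rw [e1, e2]

-- ===== glue: one leg of A's scan = one firstJ solve =====
theorem leg_of_none (k mid dx dy d x y a c L : Int)
    (habs : ∀ j : Int, 0 ≤ j → |x + j*dx - mid| + |y + j*dy - mid| = |a + j| + c)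
    (hfj : firstJ a L (k - d - c) = none) :
    aLeg k mid dx dy L.toNat d x y = (none, (d + max L 0, x + max L 0 * dx, y + max L 0 * dy)) := by
  have hmax : ((L.toNat : Int)) = max L 0 := by omega
  rw [← hmax]
  apply aLeg_none
  intro j hj
  have h1 := habs j (by positivity)
  have h2 := firstJ_none a L (k - d - c) hfj j (by positivity) (by omega)
  intro hc
  apply h2
  linarith [h1, hc]

theorem leg_of_some (k mid dx dy d x y a c L j : Int)
    (habs : ∀ i : Int, 0 ≤ i → |x + i*dx - mid| + |y + i*dy - mid| = |a + i| + c)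
    (hfj : firstJ a L (k - d - c) = some j) :
    ∃ r, aLeg k mid dx dy L.toNat d x y = (some (x + j*dx, y + j*dy), r) := by
  obtain ⟨hj0, hjL, heq, hmin⟩ := firstJ_some a L (k - d - c) j hfj
  have hjc : ((j.toNat : Nat) : Int) = j := Int.toNat_of_nonneg hj0
  have h1 : (aLeg k mid dx dy L.toNat d x y).1 = some (x + (j.toNat : Int)*dx, y + (j.toNat : Int)*dy) := by
    apply aLeg_some k mid dx dy L.toNat d x y j.toNat (by omega)
    · intro i hi
      have hmin' := hmin i (by positivity) (by omega)
      have h1 := habs i (by positivity)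
      intro hc
      apply hmin'
      linarith [h1, hc]
    · have h1 := habs (j.toNat : Int) (by positivity)
      rw [hjc] at h1 ⊢
      linarith
  refine ⟨(aLeg k mid dx dy L.toNat d x y).2, ?_⟩
  rw [hjc] at h1
  exact Prod.ext h1 rfl

-- ===== the four legs of A equal B's four firstJ solves =====
theorem legs_equiv (k mid s m d0 : Int) :
    (match aLeg k mid 1 0 (m-1).toNat d0 s s with
     | (some p, _) => (p, none)
     | (none, (d1, x1, y1)) =>
       match aLeg k mid 0 1 (m-1).toNat d1 x1 y1 with
       | (some p, _) => (p, none)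
       | (none, (d2, x2, y2)) =>
         match aLeg k mid (-1) 0 (m-1).toNat d2 x2 y2 with
         | (some p, _) => (p, none)
         | (none, (d3, x3, y3)) =>
           match aLeg k mid 0 (-1) (m-2).toNat d3 x3 y3 with
           | (some p, _) => (p, none)
           | (none, (_, x4, y4)) => ((x4, y4), none) : (Int × Int) × Option Int) =
    (match firstJ (s - mid) (m-1) (k - d0 - |s - mid|) with
     | some j => ((s + j, s), none)
     | none =>
       match firstJ (s - mid) (m-1) (k - (d0 + max (m-1) 0) - |s + max (m-1) 0 - mid|) with
       | some j => ((s + max (m-1) 0, s + j), none)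
       | none =>
         match firstJ (mid - (s + max (m-1) 0)) (m-1)
             (k - (d0 + max (m-1) 0 + max (m-1) 0) - |s + max (m-1) 0 - mid|) with
         | some j => ((s + max (m-1) 0 - j, s + max (m-1) 0), none)
         | none =>
           match firstJ (mid - (s + max (m-1) 0)) (m-2)
               (k - (d0 + max (m-1) 0 + max (m-1) 0 + max (m-1) 0) -
                 |s + max (m-1) 0 - max (m-1) 0 - mid|) with
           | some j => ((s + max (m-1) 0 - max (m-1) 0, s + max (m-1) 0 - j), none)
           | none => ((s + max (m-1) 0 - max (m-1) 0, s + max (m-1) 0 - max (m - 2) 0), none)) := by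
  have habs1 : ∀ j : Int, 0 ≤ j → |s + j*1 - mid| + |s + j*0 - mid| = |(s - mid) + j| + |s - mid| := by
    intro j _
    have e1 : |s + j*1 - mid| = |(s - mid) + j| := by ring_nf
    have e2 : |s + j*0 - mid| = |s - mid| := by ring_nf
    rw [e1, e2]
  cases hfj1 : firstJ (s - mid) (m-1) (k - d0 - |s - mid|) with
  | some j =>
    obtain ⟨r, hr⟩ := leg_of_some k mid 1 0 d0 s s (s - mid) |s - mid| (m-1) j habs1 hfj1
    rw [hr]
    simp only [Prod.mk.injEq]
    exact ⟨⟨by ring, by ring⟩, by trivial⟩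
  | none =>
    rw [leg_of_none k mid 1 0 d0 s s (s - mid) |s - mid| (m-1) habs1 hfj1] <;> dsimp only
    have habs2 : ∀ j : Int, 0 ≤ j →
        |(s + max (m-1) 0 * 1) + j*0 - mid| + |(s + max (m-1) 0 * 0) + j*1 - mid| =
          |(s - mid) + j| + |s + max (m-1) 0 - mid| := by
      intro j _
      have e1 : |(s + max (m-1) 0 * 1) + j*0 - mid| = |s + max (m-1) 0 - mid| := by ring_nf
      have e2 : |(s + max (m-1) 0 * 0) + j*1 - mid| = |(s - mid) + j| := by ring_nf
      rw [e1, e2]; ring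
    cases hfj2 : firstJ (s - mid) (m-1) (k - (d0 + max (m-1) 0) - |s + max (m-1) 0 - mid|) with
    | some j =>
      obtain ⟨r, hr⟩ := leg_of_some k mid 0 1 (d0 + max (m-1) 0) (s + max (m-1) 0 * 1)
        (s + max (m-1) 0 * 0) (s - mid) (|s + max (m-1) 0 - mid|) (m-1) j habs2 hfj2
      rw [hr]
      dsimp only
      simp only [Prod.mk.injEq]
      exact ⟨⟨by ring, by ring⟩, by trivial⟩
    | none =>
      rw [leg_of_none k mid 0 1 (d0 + max (m-1) 0) (s + max (m-1) 0 * 1)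
        (s + max (m-1) 0 * 0) (s - mid) (|s + max (m-1) 0 - mid|) (m-1) habs2 hfj2] <;> dsimp only
      have habs3 : ∀ j : Int, 0 ≤ j →
          |(s + max (m-1) 0 * 1 + max (m-1) 0 * 0) + j*(-1) - mid| +
            |(s + max (m-1) 0 * 0 + max (m-1) 0 * 1) + j*0 - mid| =
            |(mid - (s + max (m-1) 0)) + j| + |s + max (m-1) 0 - mid| := by
        intro j _
        have e1 : |(s + max (m-1) 0 * 1 + max (m-1) 0 * 0) + j*(-1) - mid| =
            |(mid - (s + max (m-1) 0)) + j| := by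
          rw [← abs_neg]; ring_nf
        have e2 : |(s + max (m-1) 0 * 0 + max (m-1) 0 * 1) + j*0 - mid| =
            |s + max (m-1) 0 - mid| := by ring_nf
        rw [e1, e2]
      cases hfj3 : firstJ (mid - (s + max (m-1) 0)) (m-1)
          (k - (d0 + max (m-1) 0 + max (m-1) 0) - |s + max (m-1) 0 - mid|) with
      | some j =>
        obtain ⟨r, hr⟩ := leg_of_some k mid (-1) 0 (d0 + max (m-1) 0 + max (m-1) 0)
          (s + max (m-1) 0 * 1 + max (m-1) 0 * 0) (s + max (m-1) 0 * 0 + max (m-1) 0 * 1)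
          (mid - (s + max (m-1) 0)) (|s + max (m-1) 0 - mid|) (m-1) j habs3 hfj3
        rw [hr]
        dsimp only
        simp only [Prod.mk.injEq]
        exact ⟨⟨by ring, by ring⟩, by trivial⟩
      | none =>
        rw [leg_of_none k mid (-1) 0 (d0 + max (m-1) 0 + max (m-1) 0)
          (s + max (m-1) 0 * 1 + max (m-1) 0 * 0) (s + max (m-1) 0 * 0 + max (m-1) 0 * 1)
          (mid - (s + max (m-1) 0)) (|s + max (m-1) 0 - mid|) (m-1) habs3 hfj3] <;> dsimp only
        have habs4 : ∀ j : Int, 0 ≤ j →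
            |(s + max (m-1) 0 * 1 + max (m-1) 0 * 0 + max (m-1) 0 * (-1)) + j*0 - mid| +
              |(s + max (m-1) 0 * 0 + max (m-1) 0 * 1 + max (m-1) 0 * 0) + j*(-1) - mid| =
              |(mid - (s + max (m-1) 0)) + j| + |s + max (m-1) 0 - max (m-1) 0 - mid| := by
          intro j _
          have e1 : |(s + max (m-1) 0 * 1 + max (m-1) 0 * 0 + max (m-1) 0 * (-1)) + j*0 - mid| =
              |s + max (m-1) 0 - max (m-1) 0 - mid| := by ring_nf
          have e2 : |(s + max (m-1) 0 * 0 + max (m-1) 0 * 1 + max (m-1) 0 * 0) + j*(-1) - mid| =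
              |(mid - (s + max (m-1) 0)) + j| := by
            rw [← abs_neg]; ring_nf
          rw [e1, e2]; ring
        cases hfj4 : firstJ (mid - (s + max (m-1) 0)) (m-2)
            (k - (d0 + max (m-1) 0 + max (m-1) 0 + max (m-1) 0) -
              |s + max (m-1) 0 - max (m-1) 0 - mid|) with
        | some j =>
          obtain ⟨r, hr⟩ := leg_of_some k mid 0 (-1)
            (d0 + max (m-1) 0 + max (m-1) 0 + max (m-1) 0)
            (s + max (m-1) 0 * 1 + max (m-1) 0 * 0 + max (m-1) 0 * (-1))
            (s + max (m-1) 0 * 0 + max (m-1) 0 * 1 + max (m-1) 0 * 0)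
            (mid - (s + max (m-1) 0)) (|s + max (m-1) 0 - max (m-1) 0 - mid|) (m-2) j habs4 hfj4
          rw [hr]
          dsimp only
          simp only [Prod.mk.injEq]
          exact ⟨⟨by ring, by ring⟩, by trivial⟩
        | none =>
          rw [leg_of_none k mid 0 (-1)
            (d0 + max (m-1) 0 + max (m-1) 0 + max (m-1) 0)
            (s + max (m-1) 0 * 1 + max (m-1) 0 * 0 + max (m-1) 0 * (-1))
            (s + max (m-1) 0 * 0 + max (m-1) 0 * 1 + max (m-1) 0 * 0)
            (mid - (s + max (m-1) 0)) (|s + max (m-1) 0 - max (m-1) 0 - mid|) (m-2) habs4 hfj4] <;> dsimp only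
          simp only [Prod.mk.injEq]
          exact ⟨⟨by ring, by ring⟩, by trivial⟩

-- ===== main equivalence =====
theorem equiv_main (n k : Int) (hpre : Pre_get_sol_pos2 n k) :
    get_sol_pos2 n k = get_sol_pos2_alt n k := by
  unfold Pre_get_sol_pos2 at hpre
  have htmax0 : (0:Int) ≤ max 0 (PySem.Int.floordiv (2*n - 3) 4) := le_max_left _ _
  have hexP : fB n (((max 0 (PySem.Int.floordiv (2*n - 3) 4)).toNat : Nat) : Int) > k := by
    rw [Int.toNat_of_nonneg htmax0]; exact hpre
  have hex : ∃ t : Nat, fB n t > k := ⟨(max 0 (PySem.Int.floordiv (2*n - 3) 4)).toNat, hexP⟩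
  have hPT : fB n (Nat.find hex) > k := Nat.find_spec hex
  have hmin : ∀ i : Nat, i < Nat.find hex → ¬ fB n i > k := fun i hi => Nat.find_min hex hi
  have hTtmax : Nat.find hex ≤ (max 0 (PySem.Int.floordiv (2*n - 3) 4)).toNat := Nat.find_min' hex hexP
  have hfd4 : PySem.Int.floordiv (2*n-3) 4 = (2*n-3)/4 := pvFloordivPos _ _ (by norm_num)
  have hTn : Nat.find hex < n.toNat + 1 := by
    have h2 : (max 0 (PySem.Int.floordiv (2*n - 3) 4)).toNat ≤ n.toNat := by
      rcases max_choice 0 (PySem.Int.floordiv (2*n - 3) 4) with h | h <;> rw [h]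
      · omega
      · rw [hfd4]; omega
    omega
  have hloop2 : aLoop k (PySem.Int.floordiv n 2 + 1) (n.toNat + 1) n n 0 1 1 =
      (n - 2*((Nat.find hex : Nat) : Int), n - 2*((Nat.find hex : Nat) : Int),
        4*((Nat.find hex : Nat) : Int)*(n-((Nat.find hex : Nat) : Int)),
        ((Nat.find hex : Nat) : Int)+1, ((Nat.find hex : Nat) : Int)+1) := by
    have h0 := aLoop_ring n k (PySem.Int.floordiv n 2 + 1) rfl (Nat.find hex) hPT hmin (n.toNat + 1) 0
      (by omega) (by omega)
    simpa [add_comm] using h0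
  have hBt : (if fB n 0 > k then (0:Int) else
      bLoop n k (max 0 (PySem.Int.floordiv (2*n - 3) 4)).toNat 0 (max 0 (PySem.Int.floordiv (2*n - 3) 4))) =
      ((Nat.find hex : Nat) : Int) := by
    by_cases h0 : fB n 0 > k
    · rw [if_pos h0]
      have hT0 : Nat.find hex = 0 := Nat.le_zero.mp (Nat.find_min' hex (by simpa using h0))
      rw [hT0]; simp
    · rw [if_neg h0]
      have h00 : fB n 0 ≤ k := not_lt.mp h0
      have htpos : (0:Int) < max 0 (PySem.Int.floordiv (2*n-3) 4) := by
        rcases lt_or_eq_of_le htmax0 with h | h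
        · exact h
        · exfalso; rw [← h] at hpre; exact absurd hpre (not_lt.mpr h00)
      obtain ⟨hr0, hrle, hrP, hrprev⟩ := bLoop_spec n k (max 0 (PySem.Int.floordiv (2*n-3) 4)).toNat 0
        (max 0 (PySem.Int.floordiv (2*n-3) 4)) htpos h00 hpre (by omega)
      set r := bLoop n k (max 0 (PySem.Int.floordiv (2*n-3) 4)).toNat 0 (max 0 (PySem.Int.floordiv (2*n-3) 4)) with hrdef
      have hPr : fB n ((r.toNat : Nat) : Int) > k := by
        rw [Int.toNat_of_nonneg (by omega)]; exact hrP
      have hTr : ((Nat.find hex : Nat) : Int) ≤ r := by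
        have := Nat.find_min' hex hPr
        omega
      have hrT : r ≤ ((Nat.find hex : Nat) : Int) := by
        by_contra hcon
        push_neg at hcon
        have hbound : ((Nat.find hex : Nat) : Int) + ((r - 1 - (Nat.find hex : Nat)).toNat : Int)
            = r - 1 := by omega
        have hd := fB_mono n (r - 1 - ((Nat.find hex : Nat) : Int)).toNat
          ((Nat.find hex : Nat) : Int) (by positivity) (by rw [hbound]; omega)
        rw [hbound] at hd
        linarith
      omega
  show get_sol_pos2 n k = get_sol_pos2_alt n k
  simp only [get_sol_pos2, get_sol_pos2_alt]
  rw [hloop2, hBt]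
  exact legs_equiv k (PySem.Int.floordiv n 2 + 1) (((Nat.find hex : Nat) : Int)+1)
    (n - 2*((Nat.find hex : Nat) : Int)) (4*((Nat.find hex : Nat) : Int)*(n-((Nat.find hex : Nat) : Int)))


-- ===== VERDICT (by name: the statement is the Claim_ definition above) =====
theorem get_sol_pos2_spec : Claim_equal_get_sol_pos2 := by
  intro n k _ hpre
  unfold Spec_get_sol_pos2
  exact equiv_main n k hpre
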